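-- pv_equiv track=rewrite | github.com/di-uni/problem-solving | codility/Lesson5_PassingCars.py | solution
-- ===== SOURCE A (Python) =====
-- def solution(A):
--     basis_car = A[0]
--     basis_cnt = 1
--     passing = 0
--
--     for i in range(1, len(A)):
--         if A[i] == basis_car:
--             basis_cnt += 1
--         else:
--             passing += basis_cnt
--
--     if passing > 1000000000:
--         return -1
--
--     return passing
-- ===== SOURCE B (Python) =====
-- def solution(A):
--     basis = A[0]
--     remaining = sum(1 for x in A if x != basis)
--     passing = 0
--     for x in A:
--         if x == basis:
--             passing += remaining
--         else:
--             remaining -= 1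
--     if passing > 1000000000:
--         return -1
--     return passing
-- ===== Notes on version B (the rewrite author's own statement) =====
-- stated objective: alternative
-- what changed: B counts non-basis elements first and then complement-accumulates: for each basis element it adds the number of non-basis elements still to come, instead of A's running count of basis elements added at each non-basis element.
import Mathlib
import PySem

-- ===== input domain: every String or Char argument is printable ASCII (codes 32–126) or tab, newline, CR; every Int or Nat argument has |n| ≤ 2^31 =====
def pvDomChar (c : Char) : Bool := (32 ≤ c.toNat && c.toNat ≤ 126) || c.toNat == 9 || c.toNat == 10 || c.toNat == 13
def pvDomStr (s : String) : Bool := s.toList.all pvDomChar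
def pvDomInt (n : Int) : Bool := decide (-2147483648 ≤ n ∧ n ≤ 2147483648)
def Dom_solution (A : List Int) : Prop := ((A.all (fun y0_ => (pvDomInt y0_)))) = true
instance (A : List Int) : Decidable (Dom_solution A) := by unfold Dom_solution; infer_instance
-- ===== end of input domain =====

-- B replaces A's running count of basis elements (added at each later non-basis element) by the
-- complement: count the non-basis elements first, then for each basis element add the number of
-- non-basis elements still to come. Same pair count, same >1e9 clamp.

-- ===== PORT A =====
-- A's for-loop over range(1, len(A)) carrying (basis_cnt, passing); A[i] via pyGetD (index always in range).
def solution (A : List Int) : Int :=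
  let basis_car := PySem.List.pyGetD A 0 0
  let s := (PySem.List.pyRange 1 (A.length : Int) 1).foldl
    (fun (s : Int × Int) i =>
      if PySem.List.pyGetD A i 0 = basis_car then (s.1 + 1, s.2) else (s.1, s.2 + s.1))
    (1, 0)
  if s.2 > 1000000000 then -1 else s.2

-- ===== PORT B =====
def solution_alt (A : List Int) : Int :=
  let basis := PySem.List.pyGetD A 0 0
  let remaining : Int := ((A.filter (fun x => x ≠ basis)).length : Int)
  let s := A.foldl
    (fun (s : Int × Int) x =>
      if x = basis then (s.1 + s.2, s.2) else (s.1, s.2 - 1))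
    (0, remaining)
  if s.1 > 1000000000 then -1 else s.1

-- ===== PRECONDITION & SPEC =====
-- Pre_ excludes only the empty list, on which the Python A (and B) raise IndexError at A[0].
def Pre_solution (A : List Int) : Prop := A ≠ []
instance (A : List Int) : Decidable (Pre_solution A) := by unfold Pre_solution; infer_instance
def pvWitness_solution : List Int := [1, 2, 1]

def Spec_solution (A : List Int) (out : Int) : Prop := out = solution_alt A
instance (A : List Int) (out : Int) : Decidable (Spec_solution A out) := by unfold Spec_solution; infer_instance

-- ===== CLAIM (what is proved, stated in full; the proofs are below) =====
def Claim_equal_solution : Prop := ∀ (A : List Int), Dom_solution A → Pre_solution A → Spec_solution A (solution A)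

-- ===== LEMMAS AND PROOFS =====

-- number of non-basis elements
def pvNB (b : Int) (l : List Int) : Int := ((l.filter (fun x => x ≠ b)).length : Int)

-- the pair count, recursively
def pvPairs (b : Int) : List Int → Int
  | [] => 0
  | x :: xs => if x = b then pvNB b xs + pvPairs b xs else pvPairs b xs

theorem pvNB_cons (b x : Int) (xs : List Int) :
    pvNB b (x :: xs) = if x = b then pvNB b xs else pvNB b xs + 1 := by
  simp [pvNB, List.filter]
  split_ifs with h <;> simp [h]

theorem pvAfold (b : Int) (l : List Int) (c p : Int) :
    (l.foldl (fun (s : Int × Int) x =>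
        if x = b then (s.1 + 1, s.2) else (s.1, s.2 + s.1)) (c, p)).2
      = p + c * pvNB b l + pvPairs b l := by
  induction l generalizing c p with
  | nil => simp [pvNB, pvPairs]
  | cons x xs ih =>
    by_cases h : x = b <;>
      simp [List.foldl, h, ih, pvPairs, pvNB_cons] <;> ring

theorem pvBfold (b : Int) (l : List Int) (p : Int) :
    (l.foldl (fun (s : Int × Int) x =>
        if x = b then (s.1 + s.2, s.2) else (s.1, s.2 - 1)) (p, pvNB b l)).1
      = p + pvPairs b l := by
  induction l generalizing p with
  | nil => simp [pvPairs]
  | cons x xs ih =>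
    by_cases h : x = b
    · simp only [List.foldl, if_pos h, pvNB_cons]
      rw [ih (p + pvNB b xs)]; simp [pvPairs, h]; ring
    · have : pvNB b (x :: xs) - 1 = pvNB b xs := by rw [pvNB_cons]; simp [h]
      simp only [List.foldl, if_neg h, this]
      rw [ih p]; simp [pvPairs, h]

theorem solution_eq (A : List Int) (hA : A ≠ []) : solution A = solution_alt A := by
  obtain ⟨a0, tl, rfl⟩ := List.exists_cons_of_ne_nil hA
  have hb : PySem.List.pyGetD (a0 :: tl) 0 0 = a0 := by
    simp [PySem.List.pyGetD, PySem.List.pyGet?, PySem.List.pyIdx?]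
  have hr : (PySem.List.pyRange 1 ((a0 :: tl).length : Int) 1).foldl
      (fun (s : Int × Int) i =>
        if PySem.List.pyGetD (a0 :: tl) i 0 = a0 then (s.1 + 1, s.2) else (s.1, s.2 + s.1))
      (1, 0)
      = tl.foldl (fun (s : Int × Int) x =>
          if x = a0 then (s.1 + 1, s.2) else (s.1, s.2 + s.1)) (1, 0) := by
    simpa [PySem.List.len] using
      PySem.List.foldl_pyRange_pyGetD (xs := a0 :: tl) (a := 1) (d := (0 : Int))
        (f := fun (s : Int × Int) x => if x = a0 then (s.1 + 1, s.2) else (s.1, s.2 + s.1))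
        (init := ((1 : Int), (0 : Int))) (by norm_num)
  simp only [solution, solution_alt, hb]
  rw [hr, pvAfold a0 tl 1 0]
  have h2 : ((((a0 :: tl).filter (fun x => x ≠ a0)).length : Int)) = pvNB a0 (a0 :: tl) := rfl
  rw [h2, pvBfold a0 (a0 :: tl) 0]
  have h3 : pvPairs a0 (a0 :: tl) = pvNB a0 tl + pvPairs a0 tl := by simp [pvPairs]
  rw [h3]
  ring_nf

-- ===== VERDICT (by name: the statement is the Claim_ definition above) =====
theorem solution_spec : Claim_equal_solution := by
  intro A _ hPre
  unfold Spec_solution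
  exact solution_eq A hPre
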